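-- pv_equiv track=rewrite | github.com/zhangshuoyang666/CASNet | tools/compare_saff_boundary_results.py | group_metric_rows
-- ===== SOURCE A (Python) =====
-- def group_metric_rows(rows):
--     groups = []
--     current = []
--     for row in rows:
--         if row.get("Iter", ""):
--             if current:
--                 groups.append(current)
--             current = [row]
--         elif current:
--             current.append(row)
--     if current:
--         groups.append(current)
--     return groups
-- ===== SOURCE B (Python) =====
-- def group_metric_rows(rows):
--     starts = [i for i, row in enumerate(rows) if row.get("Iter", "")]
--     return [rows[s:e] for s, e in zip(starts, starts[1:] + [len(rows)])]
-- ===== Notes on version B (the rewrite author's own statement) =====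
-- stated objective: alternative
-- what changed: replaced the single-pass accumulator (groups/current lists mutated per row) with a two-phase index-then-slice approach: collect the indices of marker rows, then emit each group as a slice between consecutive marker indices
import Mathlib
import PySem

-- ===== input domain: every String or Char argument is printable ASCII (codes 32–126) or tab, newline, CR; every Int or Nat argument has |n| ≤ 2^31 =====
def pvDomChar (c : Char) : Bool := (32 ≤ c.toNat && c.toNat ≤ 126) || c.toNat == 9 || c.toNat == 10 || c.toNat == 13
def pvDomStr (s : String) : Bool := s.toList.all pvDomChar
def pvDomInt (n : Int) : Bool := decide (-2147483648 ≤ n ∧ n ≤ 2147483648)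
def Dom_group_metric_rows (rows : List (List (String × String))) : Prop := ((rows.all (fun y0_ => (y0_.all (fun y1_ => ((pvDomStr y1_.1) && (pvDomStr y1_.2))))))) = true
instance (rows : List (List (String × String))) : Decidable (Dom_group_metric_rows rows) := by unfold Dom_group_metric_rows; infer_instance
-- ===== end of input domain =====

-- B replaces A's single-pass accumulator with a two-phase index-then-slice decomposition (same O(n) cost, alternative structure).

-- row.get("Iter", "") on an association list: first match, default "" (shared by both ports)
def pvIterVal (row : List (String × String)) : String :=
  ((row.find? (fun p => p.1 == "Iter")).map Prod.snd).getD ""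

-- ===== PORT A =====
def group_metric_rows (rows : List (List (String × String))) : List (List (List (String × String))) :=
  let st := rows.foldl
    (fun (st : List (List (List (String × String))) × List (List (String × String))) row =>
      if pvIterVal row != "" then
        ((if st.2 ≠ [] then st.1 ++ [st.2] else st.1), [row])
      else if st.2 ≠ [] then (st.1, st.2 ++ [row])
      else st)
    ([], [])
  if st.2 ≠ [] then st.1 ++ [st.2] else st.1

-- ===== PORT B =====
def group_metric_rows_alt (rows : List (List (String × String))) : List (List (List (String × String))) :=
  let starts : List Int :=
    ((PySem.List.enumerate rows).filter (fun p => pvIterVal p.2 != "")).map (·.1)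
  (starts.zip (starts.tail ++ [(rows.length : Int)])).map
    (fun p => PySem.List.slice rows (some p.1) (some p.2))

-- ===== PRECONDITION & SPEC =====
def Spec_group_metric_rows (rows : List (List (String × String))) (out : List (List (List (String × String)))) : Prop := out = group_metric_rows_alt rows
instance (rows : List (List (String × String))) (out : List (List (List (String × String)))) : Decidable (Spec_group_metric_rows rows out) := by unfold Spec_group_metric_rows; infer_instance

-- ===== CLAIM (what is proved, stated in full; the proofs are below) =====
def Claim_equal_group_metric_rows : Prop := ∀ (rows : List (List (String × String))), Dom_group_metric_rows rows → Spec_group_metric_rows rows (group_metric_rows rows)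

-- ===== LEMMAS AND PROOFS =====

-- the marker test, as a Bool
def pvM (row : List (String × String)) : Bool := pvIterVal row != ""

-- canonical recursive grouping: both ports are proved equal to this
def pvG : List (List (String × String)) → List (List (List (String × String)))
  | [] => []
  | r :: rs =>
    if pvM r then
      (r :: rs.takeWhile (fun x => !pvM x)) :: pvG (rs.dropWhile (fun x => !pvM x))
    else pvG rs
termination_by l => l.length
decreasing_by
  · exact Nat.lt_succ_of_le (List.length_dropWhile_le _ _)
  · simp

-- Nat marker positions, built recursively
def pvNS : List (List (String × String)) → List Nat
  | [] => []
  | r :: rs => if pvM r then 0 :: (pvNS rs).map (· + 1) else (pvNS rs).map (· + 1)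

def pvSliceN (rows : List (List (String × String))) (s e : Nat) : List (List (String × String)) :=
  (rows.drop s).take (e - s)

def pvMkB (rows : List (List (String × String))) (ss : List Nat) : List (List (List (String × String))) :=
  (ss.zip (ss.tail ++ [rows.length])).map (fun p => pvSliceN rows p.1 p.2)

-- ---- A-side ----

theorem pvA_fold (rows : List (List (String × String)))
    (groups : List (List (List (String × String)))) (cur : List (List (String × String))) :
    (let st := rows.foldl
      (fun (st : List (List (List (String × String))) × List (List (String × String))) row =>
        if pvIterVal row != "" then
          ((if st.2 ≠ [] then st.1 ++ [st.2] else st.1), [row])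
        else if st.2 ≠ [] then (st.1, st.2 ++ [row])
        else st)
      (groups, cur)
     if st.2 ≠ [] then st.1 ++ [st.2] else st.1)
    = groups ++ (if cur = [] then pvG rows
        else (cur ++ rows.takeWhile (fun x => !pvM x)) :: pvG (rows.dropWhile (fun x => !pvM x))) := by
  induction rows generalizing groups cur with
  | nil =>
    by_cases h : cur = [] <;> simp [h, pvG]
  | cons r rs ih =>
    by_cases hm : pvM r
    · have hm' : (pvIterVal r != "") = true := hm
      by_cases h : cur = []
      · simp only [List.foldl_cons, hm', h, if_true, ne_eq, not_true_eq_false,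
          if_false]
        rw [ih]
        simp [pvG, hm]
      · simp only [List.foldl_cons, hm', h, ne_eq, if_true]
        rw [ih]
        simp [pvG, hm]
    · have hm' : (pvIterVal r != "") = false := by simpa [pvM] using hm
      by_cases h : cur = []
      · simp only [List.foldl_cons, hm', h, ne_eq, not_true_eq_false, if_false,
          Bool.false_eq_true]
        rw [ih]
        simp [pvG, hm]
      · simp only [List.foldl_cons, hm', h, ne_eq, Bool.false_eq_true, if_false]
        rw [ih]
        simp [pvM] at hm
        simp [h, hm, pvM]

theorem pvA_eq_pvG (rows : List (List (String × String))) : group_metric_rows rows = pvG rows := by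
  unfold group_metric_rows
  simpa using pvA_fold rows [] []

-- ---- B-side ----

theorem pvStarts_shift (rows : List (List (String × String))) (s : Int) :
    ((PySem.List.enumerate rows s).filter (fun p => pvIterVal p.2 != "")).map (·.1)
      = (pvNS rows).map (fun k => s + Int.ofNat k) := by
  induction rows generalizing s with
  | nil => simp [pvNS, PySem.List.enumerate_nil]
  | cons r rs ih =>
    rw [PySem.List.enumerate_cons]
    by_cases hm : pvM r
    · have hm' : (pvIterVal r != "") = true := hm
      simp only [List.filter_cons, hm', if_true, List.map_cons, ih, pvNS, hm]
      simp only [List.map_map, List.cons.injEq]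
      refine ⟨by simp, ?_⟩
      apply List.map_congr_left
      intro k _
      simp only [Function.comp]
      simp only [Int.ofNat_eq_natCast]; push_cast; ring
    · have hm' : (pvIterVal r != "") = false := by simpa [pvM] using hm
      simp only [List.filter_cons, hm', ih, pvNS, hm, Bool.false_eq_true, if_false]
      simp only [List.map_map]
      apply List.map_congr_left
      intro k _
      simp only [Function.comp]
      simp only [Int.ofNat_eq_natCast]; push_cast; ring

theorem pvMkB_shift (r : List (String × String)) (rows : List (List (String × String))) (ss : List Nat) :
    pvMkB (r :: rows) (ss.map (· + 1)) = pvMkB rows ss := by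
  simp only [pvMkB, List.length_cons]
  rw [show (ss.map (· + 1)).tail = ss.tail.map (· + 1) by cases ss <;> simp]
  rw [show ss.tail.map (· + 1) ++ [rows.length + 1] = (ss.tail ++ [rows.length]).map (· + 1) by simp]
  rw [List.zip_map]
  simp only [List.map_map]
  apply List.map_congr_left
  intro p _
  simp [pvSliceN, Prod.map, Function.comp, Nat.add_sub_add_right]

theorem pvNS_nil_iff (rows : List (List (String × String))) :
    pvNS rows = [] ↔ ∀ x ∈ rows, pvM x = false := by
  induction rows with
  | nil => simp [pvNS]
  | cons r rs ih => by_cases hm : pvM r <;> simp [pvNS, hm, ih]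

theorem pvNS_head (rows : List (List (String × String))) (s0 : Nat) (ss : List Nat)
    (h : pvNS rows = s0 :: ss) :
    rows.takeWhile (fun x => !pvM x) = rows.take s0 := by
  induction rows generalizing s0 ss with
  | nil => simp [pvNS] at h
  | cons r rs ih =>
    by_cases hm : pvM r
    · simp only [pvNS, hm, if_true] at h
      obtain ⟨h0, -⟩ := List.cons_eq_cons.mp h
      subst h0
      simp [hm]
    · simp only [pvNS, hm, if_false, Bool.false_eq_true] at h
      cases hns : pvNS rs with
      | nil => rw [hns] at h; simp at h
      | cons a as =>
        rw [hns] at h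
        simp only [List.map_cons, List.cons_eq_cons] at h
        obtain ⟨h1, -⟩ := h
        subst h1
        simp [hm, ih a as hns]

theorem pvG_dropWhile (rows : List (List (String × String))) :
    pvG (rows.dropWhile (fun x => !pvM x)) = pvG rows := by
  induction rows with
  | nil => simp
  | cons r rs ih =>
    by_cases hm : pvM r
    · simp [hm]
    · rw [List.dropWhile_cons]
      simp only [hm, Bool.not_false, if_true]
      rw [ih]
      conv_rhs => rw [pvG]
      simp [hm]

theorem pvMkB_eq_pvG (rows : List (List (String × String))) :
    pvMkB rows (pvNS rows) = pvG rows := by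
  induction rows with
  | nil => simp [pvMkB, pvNS, pvG]
  | cons r rs ih =>
    by_cases hm : pvM r
    · rw [show pvNS (r :: rs) = 0 :: (pvNS rs).map (· + 1) by simp [pvNS, hm]]
      rw [show pvG (r :: rs) = (r :: rs.takeWhile (fun x => !pvM x)) :: pvG (rs.dropWhile (fun x => !pvM x)) by rw [pvG]; simp [hm]]
      cases hns : pvNS rs with
      | nil =>
        have hall : ∀ x ∈ rs, pvM x = false := (pvNS_nil_iff rs).mp hns
        have htw : rs.takeWhile (fun x => !pvM x) = rs := List.takeWhile_eq_self_iff.mpr (by intro x hx; simp [hall x hx])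
        have hdw : rs.dropWhile (fun x => !pvM x) = [] := List.dropWhile_eq_nil_iff.mpr (by intro x hx; simp [hall x hx])
        simp [pvMkB, pvSliceN, htw, hdw, pvG]
      | cons a as =>
        have hhead : pvSliceN (r :: rs) 0 (a + 1) = r :: rs.takeWhile (fun x => !pvM x) := by
          rw [pvNS_head rs a as hns]
          simp [pvSliceN]
        have htail : pvMkB (r :: rs) ((pvNS rs).map (· + 1)) = pvG (rs.dropWhile (fun x => !pvM x)) := by
          rw [pvMkB_shift, ih, pvG_dropWhile]
        rw [← htail, ← hhead]
        simp only [pvMkB, hns, List.map_cons, List.tail_cons, List.length_cons]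
        rfl
    · rw [show pvNS (r :: rs) = (pvNS rs).map (· + 1) by simp [pvNS, hm]]
      rw [pvMkB_shift, ih]
      conv_rhs => rw [pvG]
      simp [hm]

theorem pvB_eq_pvG (rows : List (List (String × String))) :
    group_metric_rows_alt rows = pvG rows := by
  rw [← pvMkB_eq_pvG]
  unfold group_metric_rows_alt
  rw [show PySem.List.enumerate rows = PySem.List.enumerate rows 0 from rfl, pvStarts_shift]
  simp only [zero_add]
  rw [show ((pvNS rows).map Int.ofNat).tail = (pvNS rows).tail.map Int.ofNat by cases h : pvNS rows <;> simp]
  rw [show (pvNS rows).tail.map Int.ofNat ++ [(rows.length : Int)] = ((pvNS rows).tail ++ [rows.length]).map Int.ofNat by simp [Int.ofNat_eq_natCast]]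
  rw [List.zip_map]
  simp only [List.map_map]
  apply List.map_congr_left
  intro p _
  simp only [Function.comp, Prod.map, Int.ofNat_eq_natCast]
  rw [PySem.List.slice_natCast]
  rfl

-- ===== VERDICT (by name: the statement is the Claim_ definition above) =====
theorem group_metric_rows_spec : Claim_equal_group_metric_rows := by
  intro rows _
  unfold Spec_group_metric_rows
  rw [pvA_eq_pvG, pvB_eq_pvG]
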